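-- pv_equiv track=rewrite | github.com/issdandavis/SCBE-AETHERMOORE | scripts/aetherpp/parse.py | split_statements
-- ===== SOURCE A (Python) =====
-- def split_statements(program: str) -> list[str]:
--     # Statement terminator is ".", but keep decimal literals like 0.5 intact.
--     chunks: list[str] = []
--     buf: list[str] = []
--     text = program.strip()
--     for i, ch in enumerate(text):
--         if ch == ".":
--             prev = text[i - 1] if i > 0 else ""
--             nxt = text[i + 1] if i + 1 < len(text) else ""
--             if prev.isdigit() and nxt.isdigit():
--                 buf.append(ch)
--                 continue
--             current = "".join(buf).strip()
--             if current:
--                 chunks.append(current)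
--             buf = []
--             continue
--         buf.append(ch)
--     tail = "".join(buf).strip()
--     if tail:
--         chunks.append(tail)
--     return chunks
-- ===== SOURCE B (Python) =====
-- def split_statements(program: str) -> list[str]:
--     # Compute terminator positions first, then slice the text between them.
--     text = program.strip()
--     n = len(text)
--     cuts = [i for i in range(n)
--             if text[i] == "."
--             and not (i > 0 and text[i - 1].isdigit()
--                      and i + 1 < n and text[i + 1].isdigit())]
--     parts: list[str] = []
--     start = 0
--     for c in cuts + [n]:
--         piece = text[start:c].strip()
--         if piece:
--             parts.append(piece)
--         start = c + 1
--     return parts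
-- ===== Notes on version B (the rewrite author's own statement) =====
-- stated objective: alternative
-- what changed: B computes the list of terminator positions (dots not surrounded by digits) up front and slices the text between consecutive positions, instead of A's single scan that maintains a mutable character buffer and flushes it at each terminator.
import Mathlib
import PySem

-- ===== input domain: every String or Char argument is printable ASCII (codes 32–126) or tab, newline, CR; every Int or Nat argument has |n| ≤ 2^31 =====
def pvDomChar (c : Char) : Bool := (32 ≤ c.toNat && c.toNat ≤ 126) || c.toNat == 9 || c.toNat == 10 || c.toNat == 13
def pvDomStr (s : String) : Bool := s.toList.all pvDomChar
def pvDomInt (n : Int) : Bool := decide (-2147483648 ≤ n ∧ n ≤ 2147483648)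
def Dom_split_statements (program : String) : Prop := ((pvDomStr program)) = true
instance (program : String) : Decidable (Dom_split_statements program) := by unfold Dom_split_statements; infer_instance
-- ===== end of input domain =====

-- B replaces A's stateful char-buffer scan by computing the list of terminator positions
-- first and then slicing the text between them (objective: alternative structure, same cost).

-- ===== PORT A =====
-- helper: `text[j].isdigit()` for an Int index (A indexes with ints from enumerate)
def pvDigI (text : List Char) (j : Int) : Bool :=
  match PySem.List.pyGet? text j with
  | some c => PySem.Chars.isdigit c
  | none => false

-- helper: one step of A's for-loop over enumerate(text) with state (chunks, buf);
-- the `else false` branches are Python's `"".isdigit() == False`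
def pvStepA (text : List Char) (st : List String × List Char) (p : Int × Char) :
    List String × List Char :=
  if p.2 = '.' then
    let prevD := if 0 < p.1 then pvDigI text (p.1 - 1) else false
    let nxtD := if p.1 + 1 < (text.length : Int) then pvDigI text (p.1 + 1) else false
    if prevD && nxtD then (st.1, st.2 ++ [p.2])
    else
      (if PySem.Chars.strip st.2 ≠ [] then st.1 ++ [String.mk (PySem.Chars.strip st.2)]
       else st.1, [])
  else (st.1, st.2 ++ [p.2])

def split_statements (program : String) : List String :=
  let text := (PySem.Str.strip program).toList
  let fin := (PySem.List.enumerate text).foldl (pvStepA text) ([], [])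
  let tail := PySem.Chars.strip fin.2
  if tail ≠ [] then fin.1 ++ [String.mk tail] else fin.1

-- ===== PORT B =====
-- helper: `text[j].isdigit()` for a Nat index (B indexes with nats from range(n))
def pvDigN (text : List Char) (j : Nat) : Bool :=
  match text[j]? with
  | some c => PySem.Chars.isdigit c
  | none => false

-- helper: is index i a statement terminator? (a '.' not surrounded by digits)
def pvCut (text : List Char) (i : Nat) : Bool :=
  (text[i]? == some '.') &&
  !(decide (0 < i) && pvDigN text (i-1) && decide (i + 1 < text.length) && pvDigN text (i+1))

-- helper: B's loop body: slice text[start:c], strip, keep if nonempty; start := c+1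
def pvStepB (text : List Char) (st : Nat × List String) (c : Nat) : Nat × List String :=
  let piece := PySem.Chars.strip (PySem.List.slice text (some (st.1 : Int)) (some (c : Int)))
  (c + 1, if piece ≠ [] then st.2 ++ [String.mk piece] else st.2)

def split_statements_alt (program : String) : List String :=
  let text := (PySem.Str.strip program).toList
  let n := text.length
  let cuts := (List.range n).filter (pvCut text)
  ((cuts ++ [n]).foldl (pvStepB text) (0, [])).2

-- ===== PRECONDITION & SPEC =====
def Spec_split_statements (program : String) (out : List String) : Prop := out = split_statements_alt program
instance (program : String) (out : List String) : Decidable (Spec_split_statements program out) := by unfold Spec_split_statements; infer_instance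

-- ===== CLAIM (what is proved, stated in full; the proofs are below) =====
def Claim_equal_split_statements : Prop := ∀ (program : String), Dom_split_statements program → Spec_split_statements program (split_statements program)

-- ===== LEMMAS AND PROOFS =====

-- A's finishing step applied to a loop state
def pvFinA (st : List String × List Char) : List String :=
  if PySem.Chars.strip st.2 ≠ [] then st.1 ++ [String.mk (PySem.Chars.strip st.2)] else st.1

-- main invariant: A's remaining loop (from index i, buffer = text[s:i]) followed by A's
-- tail step agrees with B's remaining fold over the cut indices ≥ i and the final slice
theorem pv_loop_eq (t : List Char) :
    ∀ (d : List Char) (i s : Nat) (chunks : List String),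
      d = t.drop i → s ≤ i → i ≤ t.length →
      pvFinA ((PySem.List.enumerate d (i : Int)).foldl (pvStepA t)
          (chunks, (t.drop s).take (i - s)))
        = (pvStepB t ((List.range' i (t.length - i)).foldl
            (fun st a => if pvCut t a then pvStepB t st a else st) (s, chunks)) t.length).2 := by
  intro d
  induction d with
  | nil =>
    intro i s chunks hd hs hi
    have hlen : t.length - i = 0 := by
      have := congrArg List.length hd
      simp at this
      omega
    have hie : i = t.length := by omega
    subst hie
    simp [PySem.List.enumerate, pvFinA, pvStepB, PySem.List.slice_natCast]
  | cons c d' ih =>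
    intro i s chunks hd hs hi
    have hi' : i < t.length := by
      have := congrArg List.length hd
      simp at this
      omega
    rw [List.drop_eq_getElem_cons hi'] at hd
    injection hd with hc hd'
    have hn : t.length - i = (t.length - (i+1)) + 1 := by omega
    rw [hn, List.range'_succ]
    simp only [PySem.List.enumerate, List.foldl_cons]
    have hcast : (i : Int) + 1 = ((i + 1 : Nat) : Int) := by push_cast; ring
    rw [hcast]
    by_cases hdot : c = '.'
    · -- the character at i is a dot
      have hprev : (if 0 < (i : Int) then pvDigI t ((i : Int) - 1) else false)
          = (decide (0 < i) && pvDigN t (i-1)) := by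
        by_cases h0 : 0 < i
        · rw [if_pos (by exact_mod_cast h0)]
          simp only [pvDigI, pvDigN, show (i : Int) - 1 = ((i - 1 : Nat) : Int) from by omega,
            PySem.List.pyGet?_natCast, h0, decide_true, Bool.true_and]
        · rw [if_neg (by exact_mod_cast h0)]
          simp [h0]
      have hnxt : (if (i : Int) + 1 < (t.length : Int) then pvDigI t ((i : Int) + 1) else false)
          = (decide (i + 1 < t.length) && pvDigN t (i+1)) := by
        by_cases h1 : i + 1 < t.length
        · rw [if_pos (by exact_mod_cast h1), hcast]
          simp only [pvDigI, pvDigN, PySem.List.pyGet?_natCast, h1, decide_true, Bool.true_and]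
        · rw [if_neg (by exact_mod_cast h1)]
          simp [h1]
      have hA : pvStepA t (chunks, (t.drop s).take (i - s)) ((i : Int), c)
          = if ((decide (0 < i) && pvDigN t (i-1)) && (decide (i + 1 < t.length) && pvDigN t (i+1))) then
              (chunks, (t.drop s).take (i - s) ++ [c])
            else (if PySem.Chars.strip ((t.drop s).take (i - s)) ≠ [] then
                    chunks ++ [String.mk (PySem.Chars.strip ((t.drop s).take (i - s)))]
                  else chunks, []) := by
        simp only [pvStepA, hdot, if_pos]
        rw [hprev, hnxt]
      have hti : t[i]? = some '.' := by
        rw [List.getElem?_eq_getElem hi', ← hc, hdot]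
      have hCut : pvCut t i
          = !((decide (0 < i) && pvDigN t (i-1)) && (decide (i + 1 < t.length) && pvDigN t (i+1))) := by
        simp [pvCut, hti, Bool.and_assoc]
      cases hK : ((decide (0 < i) && pvDigN t (i-1)) && (decide (i + 1 < t.length) && pvDigN t (i+1))) with
      | true =>
        rw [hA, if_pos hK, hCut, hK]
        simp only [Bool.not_true, Bool.false_eq_true, if_false]
        have hbuf : (t.drop s).take (i - s) ++ [c] = (t.drop s).take (i + 1 - s) := by
          rw [show i + 1 - s = (i - s) + 1 by omega, List.take_add_one,
              List.getElem?_drop, show s + (i - s) = i by omega, hti, hdot]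
          rfl
        rw [hbuf]
        exact ih (i+1) s chunks hd' (by omega) hi'
      | false =>
        rw [hA, if_neg (by simp [hK]), hCut, hK]
        simp only [Bool.not_false, if_true]
        have hB : pvStepB t (s, chunks) i
            = (i + 1, if PySem.Chars.strip ((t.drop s).take (i - s)) ≠ [] then
                chunks ++ [String.mk (PySem.Chars.strip ((t.drop s).take (i - s)))] else chunks) := by
          simp [pvStepB, PySem.List.slice_natCast]
        rw [hB]
        have := ih (i+1) (i+1)
          (if PySem.Chars.strip ((t.drop s).take (i - s)) ≠ [] then
            chunks ++ [String.mk (PySem.Chars.strip ((t.drop s).take (i - s)))] else chunks)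
          hd' (le_refl _) hi'
        simpa using this
    · -- an ordinary character: A appends to buf, B's cut predicate is false at i
      have hti : t[i]? = some c := by
        rw [List.getElem?_eq_getElem hi', hc]
      have hCut : pvCut t i = false := by
        simp [pvCut, hti, hdot]
      have hA : pvStepA t (chunks, (t.drop s).take (i - s)) ((i : Int), c)
          = (chunks, (t.drop s).take (i - s) ++ [c]) := by
        simp [pvStepA, hdot]
      rw [hA, hCut]
      simp only [Bool.false_eq_true, if_false]
      have hbuf : (t.drop s).take (i - s) ++ [c] = (t.drop s).take (i + 1 - s) := by
        rw [show i + 1 - s = (i - s) + 1 by omega, List.take_add_one,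
            List.getElem?_drop, show s + (i - s) = i by omega, hti]
        rfl
      rw [hbuf]
      exact ih (i+1) s chunks hd' (by omega) hi'

-- ===== VERDICT (by name: the statement is the Claim_ definition above) =====
theorem split_statements_spec : Claim_equal_split_statements := by
  intro program _
  unfold Spec_split_statements split_statements split_statements_alt
  simp only []
  have h := pv_loop_eq ((PySem.Str.strip program).toList) ((PySem.Str.strip program).toList)
      0 0 [] (by simp) (Nat.le_refl 0) (Nat.zero_le _)
  simp only [List.drop_zero, Nat.sub_zero, List.take_zero, Nat.cast_zero] at h
  rw [List.foldl_append, List.range_eq_range', List.foldl_filter]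
  simp only [List.foldl_cons, List.foldl_nil]
  rw [← h]
  rfl
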